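-- pv_equiv track=rewrite | github.com/seonjaechoi0307/TIL | Study/Code_Test/School_Programers_Traning/2023-11-24.py | solution
-- ===== SOURCE A (Python) =====
-- def solution(my_string, is_prefix):
--
--     # 솔루션 정의
--     # 어떤 문자열에 대해서 접두사는 특정 인덱스까지의 문자열을 의미합니다.
--     # 예를 들어, "banana"의 모든 접두사는 "b", "ba", "ban", "bana", "banan", "banana"입니다.
--     # 문자열 my_string과 is_prefix가 주어질 때, is_prefix가 my_string의 접두사라면
--     # 1을, 아니면 0을 return 하는 solution 함수를 작성해 주세요.
--
--     # 로직 구상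
--     # 1. my_string, is_prefix의 문자열 길이를 구하고
--     # 2. 문자열의 길이를 비교하여 같거나 작을 시 로직 시작
--     # 3. my_string를 슬라이싱한 값과 is_prefix이 일치하는지 확인
--     # 4. 일치 시 1을 아니면 0을 반환
--
--     n = len(my_string)
--     m = len(is_prefix)
--
--     if n >= m :
--         for i in range(n+1) :
--             if is_prefix == my_string[:i] :
--                 return 1
--     return 0
-- ===== SOURCE B (Python) =====
-- def solution(my_string, is_prefix):
--     for i in range(len(is_prefix)):
--         if i >= len(my_string) or my_string[i] != is_prefix[i]:
--             return 0
--     return 1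
-- ===== Notes on version B (the rewrite author's own statement) =====
-- stated objective: faster
-- what changed: B does one early-exit character-by-character scan over is_prefix instead of A's loop that rebuilds and compares every prefix slice my_string[:i] for i in range(n+1).
import Mathlib
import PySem

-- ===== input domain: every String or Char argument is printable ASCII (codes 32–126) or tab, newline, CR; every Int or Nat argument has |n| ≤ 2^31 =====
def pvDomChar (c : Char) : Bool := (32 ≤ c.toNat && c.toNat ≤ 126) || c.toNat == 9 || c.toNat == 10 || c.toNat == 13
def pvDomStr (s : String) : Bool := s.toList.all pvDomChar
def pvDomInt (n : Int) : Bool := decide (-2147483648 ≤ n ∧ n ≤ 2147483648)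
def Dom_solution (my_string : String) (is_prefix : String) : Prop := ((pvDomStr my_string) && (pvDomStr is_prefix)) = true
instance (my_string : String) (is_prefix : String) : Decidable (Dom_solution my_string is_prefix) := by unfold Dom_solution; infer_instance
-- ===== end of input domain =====

-- B replaces A's quadratic scan over all prefix slices by a single early-exit character scan; objective: faster.

-- ===== PORT A =====
-- A's 'for i in range(n+1): if is_prefix == my_string[:i]: return 1' as recursion over the range list
def solutionALoop (s p : List Char) : List Int → Int
  | [] => 0
  | i :: rest =>
      if p = PySem.List.slice s none (some i) then 1 else solutionALoop s p rest

def solution (my_string : String) (is_prefix : String) : Int :=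
  let s := my_string.toList
  let p := is_prefix.toList
  let n : Int := s.length
  let m : Int := p.length
  if n ≥ m then solutionALoop s p (PySem.List.pyRange 0 (n + 1) 1) else 0

-- ===== PORT B =====
-- B's 'for i in range(len(is_prefix)): if i >= len(my_string) or my_string[i] != is_prefix[i]: return 0'
-- as the structural recursion over the two character lists (the loop index walks both strings in step)
def solutionBLoop : List Char → List Char → Int
  | _, [] => 1
  | [], _ :: _ => 0
  | c :: s, d :: p => if c ≠ d then 0 else solutionBLoop s p

def solution_alt (my_string : String) (is_prefix : String) : Int :=
  solutionBLoop my_string.toList is_prefix.toList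

-- ===== PRECONDITION & SPEC =====
def Spec_solution (my_string : String) (is_prefix : String) (out : Int) : Prop := out = solution_alt my_string is_prefix
instance (my_string : String) (is_prefix : String) (out : Int) : Decidable (Spec_solution my_string is_prefix out) := by unfold Spec_solution; infer_instance

-- ===== CLAIM (what is proved, stated in full; the proofs are below) =====
def Claim_equal_solution : Prop := ∀ (my_string : String) (is_prefix : String), Dom_solution my_string is_prefix → Spec_solution my_string is_prefix (solution my_string is_prefix)

-- ===== LEMMAS AND PROOFS =====

theorem solutionBLoop_eq (s p : List Char) :
    solutionBLoop s p = if p <+: s then 1 else 0 := by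
  induction p generalizing s with
  | nil => simp [solutionBLoop]
  | cons d p ih =>
    cases s with
    | nil => simp [solutionBLoop]
    | cons c s =>
      by_cases h : c = d
      · subst h
        simp [solutionBLoop, ih s, List.cons_prefix_cons]
      · simp [solutionBLoop, h, List.cons_prefix_cons, Ne.symm h]

theorem solutionALoop_eq (s p : List Char) (l : List Int) :
    solutionALoop s p l =
      if ∃ i ∈ l, p = PySem.List.slice s none (some i) then 1 else 0 := by
  induction l with
  | nil => simp [solutionALoop]
  | cons i rest ih =>
    by_cases h : p = PySem.List.slice s none (some i)
    · simp [solutionALoop, h]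
    · simp [solutionALoop, h, ih]

theorem solution_eq (s p : String) :
    solution s p = if p.toList <+: s.toList then 1 else 0 := by
  unfold solution
  by_cases hpre : p.toList <+: s.toList
  · have hlen : p.toList.length ≤ s.toList.length := hpre.length_le
    have hn : (s.toList.length : Int) ≥ (p.toList.length : Int) := by exact_mod_cast hlen
    rw [if_pos hpre, if_pos hn, solutionALoop_eq, if_pos]
    refine ⟨(p.toList.length : Int), ?_, ?_⟩
    · rw [PySem.List.mem_pyRange_one]
      constructor
      · positivity
      · exact_mod_cast Nat.lt_succ_of_le hlen
    · rw [PySem.List.slice_to_natCast]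
      exact (List.prefix_iff_eq_take.mp hpre)
  · rw [if_neg hpre]
    by_cases hn : (s.toList.length : Int) ≥ (p.toList.length : Int)
    · rw [if_pos hn, solutionALoop_eq, if_neg]
      rintro ⟨i, hi, hp⟩
      rw [PySem.List.mem_pyRange_one] at hi
      obtain ⟨k, rfl⟩ := Int.eq_ofNat_of_zero_le hi.1
      rw [PySem.List.slice_to_natCast] at hp
      exact hpre (hp ▸ List.take_prefix k s.toList)
    · rw [if_neg hn]

-- ===== VERDICT (by name: the statement is the Claim_ definition above) =====
theorem solution_spec : Claim_equal_solution := by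
  intro s p _
  unfold Spec_solution solution_alt
  rw [solution_eq, solutionBLoop_eq]
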